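-- pv_equiv track=rewrite | github.com/f-xxxxx/adbv2 | src/adbflow/nodes.py | _extract_region_names
-- ===== SOURCE A (Python) =====
-- from typing import Any, Callable
--
-- def _extract_region_names(regions: list[dict[str, Any]]) -> list[str]:
--     names: list[str] = []
--     used: set[str] = set()
--     for idx, region in enumerate(regions):
--         raw_name = str(region.get("name", "")).strip()
--         name = raw_name if raw_name else f"区域{idx + 1}"
--         if name in used:
--             continue
--         used.add(name)
--         names.append(name)
--     return names
-- ===== SOURCE B (Python) =====
-- def _extract_region_names(regions: list[dict[str, object]]) -> list[str]:
--     names = [str(region.get("name", "")).strip() or f"区域{idx + 1}"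
--              for idx, region in enumerate(regions)]
--
--     def dedup(xs: list[str]) -> list[str]:
--         if not xs:
--             return []
--         head = xs[0]
--         return [head] + dedup([x for x in xs[1:] if x != head])
--
--     return dedup(names)
-- ===== Notes on version B (the rewrite author's own statement) =====
-- stated objective: alternative
-- what changed: Separates name resolution (a map over enumerate) from deduplication, and replaces the seen-set bookkeeping entirely by a recursive dedup that keeps the head and filters all later occurrences of it out of the tail (no auxiliary set is ever maintained).
import Mathlib
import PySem

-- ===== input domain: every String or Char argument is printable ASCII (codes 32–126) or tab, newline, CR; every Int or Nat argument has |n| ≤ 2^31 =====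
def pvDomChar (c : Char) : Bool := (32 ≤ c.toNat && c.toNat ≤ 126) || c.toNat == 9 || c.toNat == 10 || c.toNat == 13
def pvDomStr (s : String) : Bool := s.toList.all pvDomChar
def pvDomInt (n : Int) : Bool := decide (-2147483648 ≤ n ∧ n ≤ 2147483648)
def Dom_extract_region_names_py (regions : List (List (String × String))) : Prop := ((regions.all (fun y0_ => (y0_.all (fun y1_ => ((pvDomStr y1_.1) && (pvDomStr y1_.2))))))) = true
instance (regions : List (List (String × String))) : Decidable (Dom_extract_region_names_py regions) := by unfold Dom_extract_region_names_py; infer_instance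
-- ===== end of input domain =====

-- B splits name resolution (a map) from dedup and replaces the seen-set loop by a recursive
-- head-keep / filter-tail dedup with no auxiliary set (alternative decomposition; same results).

-- ===== PORT A =====
-- name = str(region.get("name","")).strip() or f"区域{idx+1}"  (str() is the identity on the String values here)
def pvNameOf (idx : Int) (region : List (String × String)) : String :=
  let raw_name := PySem.Str.strip (PySem.Dict.getD (PySem.Dict.mk region) "name" "")
  if raw_name ≠ "" then raw_name else "区域" ++ PySem.Int.toStr (idx + 1)

-- the loop body after 'name' is computed: skip if seen, else append to both list and set
def pvStep (st : List String × PySem.Set String) (name : String) : List String × PySem.Set String :=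
  if PySem.Set.contains st.2 name then st
  else (st.1 ++ [name], PySem.Set.add st.2 name)

def extract_region_names_py (regions : List (List (String × String))) : List String :=
  (List.foldl (fun st p => pvStep st (pvNameOf p.1 p.2))
    ([], PySem.Set.empty) (PySem.List.enumerate regions)).1

-- ===== PORT B =====
-- Source B's recursive dedup: keep the head, recurse on the tail with every copy of the head filtered out
def pvDedupRec : List String → List String
  | [] => []
  | x :: xs => x :: pvDedupRec (xs.filter (fun y => y ≠ x))
termination_by l => l.length
decreasing_by
  simp only [List.length_unattach]
  exact Nat.lt_succ_of_le (le_trans (List.length_filter_le _ _) (by simp))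

def extract_region_names_py_alt (regions : List (List (String × String))) : List String :=
  pvDedupRec ((PySem.List.enumerate regions).map (fun p =>
    let stripped := PySem.Str.strip (PySem.Dict.getD (PySem.Dict.mk p.2) "name" "")
    if stripped ≠ "" then stripped else "区域" ++ PySem.Int.toStr (p.1 + 1)))

-- ===== PRECONDITION & SPEC =====
def Spec_extract_region_names_py (regions : List (List (String × String))) (out : List String) : Prop := out = extract_region_names_py_alt regions
instance (regions : List (List (String × String))) (out : List String) : Decidable (Spec_extract_region_names_py regions out) := by unfold Spec_extract_region_names_py; infer_instance

-- ===== CLAIM =====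
def Claim_equal_extract_region_names_py : Prop := ∀ (regions : List (List (String × String))), Dom_extract_region_names_py regions → Spec_extract_region_names_py regions (extract_region_names_py regions)

-- ===== LEMMAS AND PROOFS =====

-- On a diagonal state A's loop body is Set.add applied to both components.
theorem pvStep_diag (s : PySem.Set String) (y : String) :
    pvStep (s, s) y = (PySem.Set.add s y, PySem.Set.add s y) := by
  unfold pvStep PySem.Set.add
  split_ifs <;> rfl

-- In A's loop the output list and the seen-set evolve identically, so the fold over the
-- resolved names is the Set.add fold, twice.
theorem pvLoop_pair (ps : List (Int × List (String × String))) (s : PySem.Set String) :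
    List.foldl (fun st p => pvStep st (pvNameOf p.1 p.2)) (s, s) ps
    = (List.foldl PySem.Set.add s (ps.map (fun p => pvNameOf p.1 p.2)),
       List.foldl PySem.Set.add s (ps.map (fun p => pvNameOf p.1 p.2))) := by
  induction ps generalizing s with
  | nil => rfl
  | cons p ps ih =>
      rw [List.foldl_cons, List.map_cons, List.foldl_cons, pvStep_diag, ih]

theorem pvDedupRec_cons (x : String) (xs : List String) :
    pvDedupRec (x :: xs) = x :: pvDedupRec (xs.filter (fun y => y ≠ x)) := by
  simp [pvDedupRec]

-- The Set.add fold from state s is s followed by the recursive dedup of the unseen elements.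
theorem foldl_add_eq_dedupRec (l : List String) (s : PySem.Set String) :
    List.foldl PySem.Set.add s l
    = s ++ pvDedupRec (l.filter (fun y => ! PySem.Set.contains s y)) := by
  induction l generalizing s with
  | nil => simp [pvDedupRec]
  | cons x xs ih =>
      rw [List.foldl_cons]
      by_cases hx : PySem.Set.contains s x = true
      · have hmem : x ∈ s := by simpa [PySem.Set.contains] using hx
        have hadd : PySem.Set.add s x = s := by simp [PySem.Set.add, hmem]
        rw [hadd, ih s, List.filter_cons, hx]
        simp
      · have hmem : x ∉ s := by simpa [PySem.Set.contains] using hx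
        have hadd : PySem.Set.add s x = s ++ [x] := by simp [PySem.Set.add, hmem]
        rw [hadd, ih (s ++ [x]), List.filter_cons]
        simp only [hx, Bool.not_false, if_pos]
        rw [pvDedupRec_cons, List.filter_filter]
        have hfun : (fun y => ! PySem.Set.contains (s ++ [x]) y)
             = (fun y => decide (y ≠ x) && ! PySem.Set.contains s y) := by
          funext y
          simp [PySem.Set.contains, eq_comm, Bool.and_comm]
        rw [hfun]
        simp

theorem extract_region_names_py_eq (regions : List (List (String × String))) :
    extract_region_names_py regions = extract_region_names_py_alt regions := by
  unfold extract_region_names_py extract_region_names_py_alt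
  rw [show ((fun (p : Int × List (String × String)) =>
        let stripped := PySem.Str.strip (PySem.Dict.getD (PySem.Dict.mk p.2) "name" "")
        if stripped ≠ "" then stripped else "区域" ++ PySem.Int.toStr (p.1 + 1)))
      = (fun p => pvNameOf p.1 p.2) from funext (fun p => rfl)]
  rw [show (PySem.Set.empty : PySem.Set String) = ([] : List String) from rfl]
  rw [pvLoop_pair, foldl_add_eq_dedupRec]
  simp [PySem.Set.contains]

-- ===== VERDICT =====
theorem extract_region_names_py_spec : Claim_equal_extract_region_names_py := by
  intro regions _
  exact (extract_region_names_py_eq regions).symm ▸ rfl
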